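-- pv_equiv track=rewrite | github.com/viky9/hello | Daily_Logic.py | getDiscount
-- ===== SOURCE A (Python) =====
-- def getDiscount(slackPercent):
--     discount = []
--     for i in range(len(slackPercent)):
--         disc = []
--         for j in range(len(slackPercent[i])):
--             if(slackPercent[i][j]<5):
--                 disc.append(0)
--             elif(slackPercent[i][j]<10):
--                 disc.append(5)
--             elif(slackPercent[i][j]<15):
--                 disc.append(10)
--             elif(slackPercent[i][j]<20):
--                 disc.append(15)
--             elif(slackPercent[i][j]<30):
--                 disc.append(20)
--             else:
--                 disc.append(30)
--
--         discount.append(disc)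
--     return discount
-- ===== SOURCE B (Python) =====
-- import bisect
--
-- _THRESHOLDS = [5, 10, 15, 20, 30]
-- _DISCOUNTS = [0, 5, 10, 15, 20, 30]
--
-- def getDiscount(slackPercent):
--     return [[_DISCOUNTS[bisect.bisect_right(_THRESHOLDS, v)] for v in row]
--             for row in slackPercent]
-- ===== Notes on version B (the rewrite author's own statement) =====
-- stated objective: idiomatic
-- what changed: Replaces the six-way if/elif cascade with a table lookup: discounts[bisect_right(thresholds, v)] over two prebuilt parallel constant lists, inside nested list comprehensions instead of index-based loops with append.
import Mathlib
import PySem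

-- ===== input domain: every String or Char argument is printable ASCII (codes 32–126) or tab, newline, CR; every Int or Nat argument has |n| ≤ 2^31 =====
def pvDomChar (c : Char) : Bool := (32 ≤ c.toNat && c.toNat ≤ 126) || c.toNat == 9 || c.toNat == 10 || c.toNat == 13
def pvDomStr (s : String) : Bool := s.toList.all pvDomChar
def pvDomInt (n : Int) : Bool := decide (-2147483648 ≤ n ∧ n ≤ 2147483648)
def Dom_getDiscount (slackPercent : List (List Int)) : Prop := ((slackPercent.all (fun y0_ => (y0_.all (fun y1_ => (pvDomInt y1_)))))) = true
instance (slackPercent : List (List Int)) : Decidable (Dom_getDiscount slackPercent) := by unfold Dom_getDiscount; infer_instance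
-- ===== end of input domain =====

-- B replaces the if/elif cascade with a discounts-table lookup via binary search (bisect_right) over a constant threshold list; same nested element traversal, same values.
-- ===== PORT A =====
def getDiscount (slackPercent : List (List Int)) : List (List Int) :=
  (PySem.List.pyRange 0 slackPercent.length 1).foldl (fun discount i =>
    let row := PySem.List.pyGetD slackPercent i []
    let disc := (PySem.List.pyRange 0 row.length 1).foldl (fun disc j =>
      let v := PySem.List.pyGetD row j 0
      if v < 5 then disc ++ [0]
      else if v < 10 then disc ++ [5]
      else if v < 15 then disc ++ [10]
      else if v < 20 then disc ++ [15]
      else if v < 30 then disc ++ [20]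
      else disc ++ [30]) []
    discount ++ [disc]) []

-- ===== PORT B =====
def pvThresholds : List Int := [5, 10, 15, 20, 30]
def pvDiscounts : List Int := [0, 5, 10, 15, 20, 30]

-- hand port of bisect.bisect_right's lo/hi binary-search loop
def pvBisectRight (a : List Int) (x : Int) (lo hi : Nat) : Nat :=
  if _h : lo < hi then
    let mid := (lo + hi) / 2
    if x < a.getD mid 0 then pvBisectRight a x lo mid
    else pvBisectRight a x (mid + 1) hi
  else lo
termination_by hi - lo
decreasing_by all_goals omega

def getDiscount_alt (slackPercent : List (List Int)) : List (List Int) :=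
  slackPercent.map (fun row =>
    row.map (fun v => pvDiscounts.getD (pvBisectRight pvThresholds v 0 pvThresholds.length) 0))

-- ===== PRECONDITION & SPEC =====
def Spec_getDiscount (slackPercent : List (List Int)) (out : List (List Int)) : Prop := out = getDiscount_alt slackPercent
instance (slackPercent : List (List Int)) (out : List (List Int)) : Decidable (Spec_getDiscount slackPercent out) := by unfold Spec_getDiscount; infer_instance

-- ===== CLAIM (what is proved, stated in full; the proofs are below) =====
def Claim_equal_getDiscount : Prop := ∀ (slackPercent : List (List Int)), Dom_getDiscount slackPercent → Spec_getDiscount slackPercent (getDiscount slackPercent)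

-- ===== LEMMAS AND PROOFS =====
theorem pv_foldl_append {α β : Type} (g : α → β) :
    ∀ (xs : List α) (acc : List β),
      xs.foldl (fun a x => a ++ [g x]) acc = acc ++ xs.map g := by
  intro xs
  induction xs with
  | nil => simp
  | cons x xs ih => intro acc; simp [List.foldl, ih]

theorem pv_elem_eq (v : Int) :
    (if v < 5 then (0:Int) else if v < 10 then 5 else if v < 15 then 10
     else if v < 20 then 15 else if v < 30 then 20 else 30)
    = pvDiscounts.getD (pvBisectRight pvThresholds v 0 pvThresholds.length) 0 := by
  rcases lt_or_ge v 5 with h5 | h5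
  · simp [pvBisectRight, pvThresholds, pvDiscounts, h5, show v < 10 by omega,
      show v < 15 by omega]
  rcases lt_or_ge v 10 with h10 | h10
  · simp [pvBisectRight, pvThresholds, pvDiscounts, h10, show ¬ v < 5 by omega,
      show v < 15 by omega]
  rcases lt_or_ge v 15 with h15 | h15
  · simp [pvBisectRight, pvThresholds, pvDiscounts, h15, show ¬ v < 5 by omega,
      show ¬ v < 10 by omega]
  rcases lt_or_ge v 20 with h20 | h20
  · simp [pvBisectRight, pvThresholds, pvDiscounts, h20, show ¬ v < 5 by omega,
      show ¬ v < 10 by omega, show ¬ v < 15 by omega, show v < 30 by omega]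
  rcases lt_or_ge v 30 with h30 | h30
  · simp [pvBisectRight, pvThresholds, pvDiscounts, h30, show ¬ v < 5 by omega,
      show ¬ v < 10 by omega, show ¬ v < 15 by omega, show ¬ v < 20 by omega]
  · simp [pvBisectRight, pvThresholds, pvDiscounts, show ¬ v < 5 by omega,
      show ¬ v < 10 by omega, show ¬ v < 15 by omega, show ¬ v < 20 by omega,
      show ¬ v < 30 by omega]

theorem pv_if_push (disc : List Int) (v : Int) :
    (if v < 5 then disc ++ [(0:Int)]
     else if v < 10 then disc ++ [5]
     else if v < 15 then disc ++ [10]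
     else if v < 20 then disc ++ [15]
     else if v < 30 then disc ++ [20]
     else disc ++ [30])
    = disc ++ [if v < 5 then (0:Int) else if v < 10 then 5 else if v < 15 then 10
        else if v < 20 then 15 else if v < 30 then 20 else 30] := by
  split_ifs <;> rfl

theorem pv_row_eq (row : List Int) :
    (PySem.List.pyRange 0 row.length 1).foldl (fun disc j =>
      let v := PySem.List.pyGetD row j 0
      if v < 5 then disc ++ [(0:Int)]
      else if v < 10 then disc ++ [5]
      else if v < 15 then disc ++ [10]
      else if v < 20 then disc ++ [15]
      else if v < 30 then disc ++ [20]
      else disc ++ [30]) []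
    = row.map (fun v => pvDiscounts.getD (pvBisectRight pvThresholds v 0 pvThresholds.length) 0) := by
  refine Eq.trans (PySem.List.foldl_pyRange_zero_pyGetD' row 0
    (fun disc v => if v < 5 then disc ++ [(0:Int)]
      else if v < 10 then disc ++ [5]
      else if v < 15 then disc ++ [10]
      else if v < 20 then disc ++ [15]
      else if v < 30 then disc ++ [20]
      else disc ++ [30]) []) ?_
  simp only [pv_if_push]
  rw [pv_foldl_append (fun v => if v < 5 then (0:Int) else if v < 10 then 5 else if v < 15 then 10
     else if v < 20 then 15 else if v < 30 then 20 else 30) row []]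
  simp [List.map_congr_left (fun v _ => pv_elem_eq v)]

-- ===== VERDICT (by name: the statement is the Claim_ definition above) =====
theorem getDiscount_spec : Claim_equal_getDiscount := by
  intro slackPercent _
  unfold Spec_getDiscount getDiscount getDiscount_alt
  refine Eq.trans (PySem.List.foldl_pyRange_zero_pyGetD' slackPercent []
    (fun discount row => discount ++
      [(PySem.List.pyRange 0 row.length 1).foldl (fun disc j =>
        let v := PySem.List.pyGetD row j 0
        if v < 5 then disc ++ [(0:Int)]
        else if v < 10 then disc ++ [5]
        else if v < 15 then disc ++ [10]
        else if v < 20 then disc ++ [15]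
        else if v < 30 then disc ++ [20]
        else disc ++ [30]) []]) []) ?_
  rw [pv_foldl_append (fun row => (PySem.List.pyRange 0 row.length 1).foldl (fun disc j =>
        let v := PySem.List.pyGetD row j 0
        if v < 5 then disc ++ [(0:Int)]
        else if v < 10 then disc ++ [5]
        else if v < 15 then disc ++ [10]
        else if v < 20 then disc ++ [15]
        else if v < 30 then disc ++ [20]
        else disc ++ [30]) []) slackPercent []]
  simp [List.map_congr_left (fun row _ => pv_row_eq row)]
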